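-- pv_equiv track=rewrite | github.com/adeisbright/daily-byte | day_21/list_problems.py | checker_task
-- ===== SOURCE A (Python) =====
-- def checker_task(a , b):
--     a_hash = set()
--     for char in a :
--         a_hash.add(char)
--
--     for char in b:
--         if char in a_hash :
--             return 'Common'
--     return 'Uncommon'
-- ===== SOURCE B (Python) =====
-- def checker_task(a, b):
--     xs = sorted(a)
--     ys = sorted(b)
--     i = j = 0
--     while i < len(xs) and j < len(ys):
--         if xs[i] == ys[j]:
--             return 'Common'
--         if xs[i] < ys[j]:
--             i += 1
--         else:
--             j += 1
--     return 'Uncommon'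
-- ===== Notes on version B (the rewrite author's own statement) =====
-- stated objective: alternative
-- what changed: replaces the hash-set build plus early-exit membership scan with sort-then-merge: both strings are sorted and a two-pointer merge scan detects a shared character.
import Mathlib
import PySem

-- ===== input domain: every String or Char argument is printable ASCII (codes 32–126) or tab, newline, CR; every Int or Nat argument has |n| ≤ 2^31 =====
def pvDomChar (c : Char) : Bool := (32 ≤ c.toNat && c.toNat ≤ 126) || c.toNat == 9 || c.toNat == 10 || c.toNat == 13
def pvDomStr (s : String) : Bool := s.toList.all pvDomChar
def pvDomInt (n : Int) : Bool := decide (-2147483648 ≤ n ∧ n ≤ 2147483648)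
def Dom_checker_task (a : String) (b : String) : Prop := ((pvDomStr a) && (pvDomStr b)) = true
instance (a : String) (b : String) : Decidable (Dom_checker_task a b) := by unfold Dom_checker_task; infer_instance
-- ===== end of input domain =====

-- B replaces A's hash-set build + early-exit scan by sort-then-merge (two-pointer scan of the two sorted strings); same result, proved equal.

-- ===== PORT A =====
-- the 'for char in b: if char in a_hash: return "Common"' loop with early exit
def pvScanB (a_hash : PySem.Set Char) : List Char → String
  | [] => "Uncommon"
  | c :: rest => if PySem.Set.contains a_hash c then "Common" else pvScanB a_hash rest

def checker_task (a : String) (b : String) : String :=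
  let a_hash := a.toList.foldl PySem.Set.add PySem.Set.empty
  pvScanB a_hash b.toList

-- ===== PORT B =====
-- the two-pointer 'while i < len(xs) and j < len(ys)' merge scan, as recursion on the suffixes
def pvMergeScan : List Char → List Char → String
  | [], _ => "Uncommon"
  | _ :: _, [] => "Uncommon"
  | x :: xs, y :: ys =>
    if x = y then "Common"
    else if x < y then pvMergeScan xs (y :: ys)
    else pvMergeScan (x :: xs) ys
termination_by xs ys => xs.length + ys.length

def checker_task_alt (a : String) (b : String) : String :=
  pvMergeScan (PySem.List.sorted a.toList (fun c => c) false)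
              (PySem.List.sorted b.toList (fun c => c) false)

-- ===== PRECONDITION & SPEC =====
def Spec_checker_task (a : String) (b : String) (out : String) : Prop := out = checker_task_alt a b
instance (a : String) (b : String) (out : String) : Decidable (Spec_checker_task a b out) := by unfold Spec_checker_task; infer_instance

-- ===== CLAIM (what is proved, stated in full; the proofs are below) =====
def Claim_equal_checker_task : Prop := ∀ (a : String) (b : String), Dom_checker_task a b → Spec_checker_task a b (checker_task a b)

-- ===== LEMMAS AND PROOFS =====
theorem pvScanB_eq_any (s : PySem.Set Char) (l : List Char) :
    pvScanB s l = if l.any (fun c => PySem.Set.contains s c) then "Common" else "Uncommon" := by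
  induction l with
  | nil => rfl
  | cons c rest ih =>
    simp only [pvScanB, List.any_cons]
    by_cases h : c ∈ s <;> simp [h, ih]

theorem pvMergeScan_eq (xs ys : List Char)
    (hx : xs.Pairwise (· ≤ ·)) (hy : ys.Pairwise (· ≤ ·)) :
    pvMergeScan xs ys = if ∃ c, c ∈ xs ∧ c ∈ ys then "Common" else "Uncommon" := by
  induction xs generalizing ys with
  | nil => simp [pvMergeScan]
  | cons x xs ihx =>
    induction ys with
    | nil => simp [pvMergeScan]
    | cons y ys ihy =>
      have hx' := (List.pairwise_cons.1 hx).2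
      have hy' := (List.pairwise_cons.1 hy).2
      by_cases hxy : x = y
      · subst hxy
        have : ∃ c, c ∈ x :: xs ∧ c ∈ x :: ys := ⟨x, by simp, by simp⟩
        simp [pvMergeScan]
      · by_cases hlt : x < y
        · -- x smaller than everything in y :: ys
          have hxnot : x ∉ y :: ys := by
            intro hmem
            rcases List.mem_cons.1 hmem with h | h
            · exact hxy h
            · exact absurd (lt_of_lt_of_le hlt ((List.pairwise_cons.1 hy).1 _ h)) (lt_irrefl x)
          rw [show pvMergeScan (x :: xs) (y :: ys) = pvMergeScan xs (y :: ys) by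
            simp [pvMergeScan, hxy, hlt]]
          rw [ihx (y :: ys) hx' hy]
          congr 1
          · simp only [eq_iff_iff]
            constructor
            · rintro ⟨c, hc1, hc2⟩; exact ⟨c, List.mem_cons_of_mem _ hc1, hc2⟩
            · rintro ⟨c, hc1, hc2⟩
              rcases List.mem_cons.1 hc1 with h | h
              · exact absurd (h ▸ hc2) hxnot
              · exact ⟨c, h, hc2⟩
        · -- y < x: y smaller than everything in x :: xs
          have hylt : y < x := lt_of_le_of_ne (not_lt.1 hlt) (fun h => hxy h.symm)
          have hynot : y ∉ x :: xs := by
            intro hmem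
            rcases List.mem_cons.1 hmem with h | h
            · exact hxy h.symm
            · exact absurd (lt_of_lt_of_le hylt ((List.pairwise_cons.1 hx).1 _ h)) (lt_irrefl y)
          rw [show pvMergeScan (x :: xs) (y :: ys) = pvMergeScan (x :: xs) ys by
            simp [pvMergeScan, hxy, hlt]]
          rw [ihy hy']
          congr 1
          · simp only [eq_iff_iff]
            constructor
            · rintro ⟨c, hc1, hc2⟩; exact ⟨c, hc1, List.mem_cons_of_mem _ hc2⟩
            · rintro ⟨c, hc1, hc2⟩
              rcases List.mem_cons.1 hc2 with h | h
              · exact absurd (h ▸ hc1) hynot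
              · exact ⟨c, hc1, h⟩

theorem checker_task_eq (a b : String) :
    checker_task a b = checker_task_alt a b := by
  unfold checker_task checker_task_alt
  rw [show a.toList.foldl PySem.Set.add PySem.Set.empty = PySem.Set.ofList a.toList from rfl]
  rw [pvScanB_eq_any]
  rw [pvMergeScan_eq _ _ (PySem.List.sorted_pairwise _ _) (PySem.List.sorted_pairwise _ _)]
  by_cases h : ∃ c, c ∈ a.toList ∧ c ∈ b.toList
  · obtain ⟨c, ha, hb⟩ := h
    have h1 : (b.toList.any fun c => PySem.Set.contains (PySem.Set.ofList a.toList) c) = true := by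
      rw [List.any_eq_true]
      exact ⟨c, hb, (PySem.Set.contains_iff _ _).2 ((PySem.Set.mem_ofList _ _).2 ha)⟩
    have h2 : ∃ c, c ∈ PySem.List.sorted a.toList (fun c => c) false ∧
        c ∈ PySem.List.sorted b.toList (fun c => c) false :=
      ⟨c, (PySem.List.mem_sorted _ _ _ _).2 ha, (PySem.List.mem_sorted _ _ _ _).2 hb⟩
    simp
    rw [if_pos ⟨c, hb, ha⟩, if_pos ⟨c, ha, hb⟩]
  · have h1 : (b.toList.any fun c => PySem.Set.contains (PySem.Set.ofList a.toList) c) = false := by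
      rw [List.any_eq_false]
      intro c hc hcon
      exact h ⟨c, (PySem.Set.mem_ofList _ _).1 ((PySem.Set.contains_iff _ _).1 hcon), hc⟩
    have h2 : ¬ ∃ c, c ∈ PySem.List.sorted a.toList (fun c => c) false ∧
        c ∈ PySem.List.sorted b.toList (fun c => c) false := by
      rintro ⟨c, hc1, hc2⟩
      exact h ⟨c, (PySem.List.mem_sorted _ _ _ _).1 hc1, (PySem.List.mem_sorted _ _ _ _).1 hc2⟩
    simp
    rw [if_neg (fun ⟨x, hx1, hx2⟩ => h ⟨x, hx2, hx1⟩), if_neg h]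

-- ===== VERDICT (by name: the statement is the Claim_ definition above) =====
theorem checker_task_spec : Claim_equal_checker_task := by
  intro a b _
  exact checker_task_eq a b
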